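-- pv_equiv track=rewrite | github.com/jaikrishna-patil/guardian-twin-opt | services/service_optimization/algos/algo_final_assignment/algo_multiple_obj/AlgoOptimizationSingleObjScheduler.py | niss_score
-- ===== SOURCE A (Python) =====
-- def niss_score(insult_dict):
--     ais_scores_all = []
--     niss_score = 0
--     if not insult_dict.keys():
--         return None
--     for insult, ais in insult_dict.items():
--         ais_scores_all.append(ais)
--     top_3_ais_scores = sorted(ais_scores_all, reverse=True)[:3]
--     for ais_score in top_3_ais_scores:
--         niss_score += ais_score*ais_score
--     return niss_score
-- ===== SOURCE B (Python) =====
-- def _insert_sorted(lst, v):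
--     if not lst or v < lst[0]:
--         return [v] + lst
--     return [lst[0]] + _insert_sorted(lst[1:], v)
--
--
-- def niss_score(insult_dict):
--     top = []
--     for v in insult_dict.values():
--         top = _insert_sorted(top, v)
--         if len(top) > 3:
--             top = top[1:]
--     if not top:
--         return None
--     return sum(x * x for x in top)
-- ===== Notes on version B (the rewrite author's own statement) =====
-- stated objective: alternative
-- what changed: Replaces the full descending sort plus [:3] slice with a single pass that maintains a sorted buffer of at most the three largest values (insert in order, drop the smallest when it exceeds three).
import Mathlib
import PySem

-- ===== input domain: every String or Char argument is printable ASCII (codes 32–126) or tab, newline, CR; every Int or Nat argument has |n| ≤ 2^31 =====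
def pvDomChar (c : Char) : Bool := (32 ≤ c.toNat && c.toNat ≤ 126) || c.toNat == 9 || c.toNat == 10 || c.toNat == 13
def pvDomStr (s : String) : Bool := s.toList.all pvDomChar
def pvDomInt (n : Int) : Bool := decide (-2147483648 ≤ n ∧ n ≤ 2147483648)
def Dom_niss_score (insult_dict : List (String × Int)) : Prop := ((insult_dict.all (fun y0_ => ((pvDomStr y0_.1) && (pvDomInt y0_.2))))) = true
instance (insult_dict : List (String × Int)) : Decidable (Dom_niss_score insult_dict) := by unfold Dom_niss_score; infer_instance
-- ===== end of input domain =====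

-- B replaces A's full descending sort + [:3] slice by a single pass keeping a sorted buffer of the three largest values (alternative decomposition, same results).


-- ===== PORT A =====
def niss_score (insult_dict : List (String × Int)) : Option Int :=
  let d := PySem.Dict.ofList insult_dict
  if d.keys = [] then none
  else
    let ais_scores_all := d.items.foldl (fun acc p => acc ++ [p.2]) ([] : List Int)
    let top_3_ais_scores := PySem.List.slice (PySem.List.sorted ais_scores_all (fun x => x) true) none (some 3)
    some (top_3_ais_scores.foldl (fun acc a => acc + a * a) 0)

-- ===== PORT B =====
def insertSorted : List Int → Int → List Int
  | [], v => [v]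
  | x :: rest, v => if v < x then v :: x :: rest else x :: insertSorted rest v

def altStep (t : List Int) (v : Int) : List Int :=
  let t' := insertSorted t v
  if t'.length > 3 then PySem.List.slice t' (some 1) none else t'

def niss_score_alt (insult_dict : List (String × Int)) : Option Int :=
  let d := PySem.Dict.ofList insult_dict
  let top := d.values.foldl altStep []
  if top = [] then none
  else some ((top.map (fun x => x * x)).sum)

-- ===== PRECONDITION & SPEC =====
def Spec_niss_score (insult_dict : List (String × Int)) (out : Option Int) : Prop := out = niss_score_alt insult_dict
instance (insult_dict : List (String × Int)) (out : Option Int) : Decidable (Spec_niss_score insult_dict out) := by unfold Spec_niss_score; infer_instance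

-- ===== CLAIM (what is proved, stated in full; the proofs are below) =====
def Claim_equal_niss_score : Prop := ∀ (insult_dict : List (String × Int)), Dom_niss_score insult_dict → Spec_niss_score insult_dict (niss_score insult_dict)

-- ===== LEMMAS AND PROOFS =====

-- B's in-order insertion is PySem's insertBy with the strict-< test (the shape of PySem's insertion sort).
theorem insertSorted_eq_insertBy (t : List Int) (v : Int) :
    insertSorted t v = PySem.List.insertBy (fun a b : Int => decide (a < b)) v t := by
  induction t with
  | nil => simp [insertSorted, PySem.List.insertBy]
  | cons x rest ih => simp [insertSorted, PySem.List.insertBy, ih]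

theorem length_insertBy_int (v : Int) (t : List Int) :
    (PySem.List.insertBy (fun a b : Int => decide (a < b)) v t).length = t.length + 1 := by
  induction t with
  | nil => simp [PySem.List.insertBy]
  | cons x rest ih =>
    by_cases h : v < x <;> simp [PySem.List.insertBy, h, ih]

-- Inserting v into u ++ t (everything in u ≤ everything in t) and dropping |u|+1 front
-- elements is the tail of inserting v into t alone.
theorem insertBy_drop (u t : List Int) (v : Int)
    (h : ∀ x ∈ u, ∀ y ∈ t, x ≤ y) :
    (PySem.List.insertBy (fun a b : Int => decide (a < b)) v (u ++ t)).drop (u.length + 1)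
      = (PySem.List.insertBy (fun a b : Int => decide (a < b)) v t).tail := by
  induction u with
  | nil => simp [List.drop_one]
  | cons a u ih =>
    by_cases hva : v < a
    · have hvt : PySem.List.insertBy (fun a b : Int => decide (a < b)) v t = v :: t := by
        cases t with
        | nil => simp [PySem.List.insertBy]
        | cons y ys =>
          have : v < y := lt_of_lt_of_le hva (h a (by simp) y (by simp))
          simp [PySem.List.insertBy, this]
      simp [PySem.List.insertBy, hva, hvt]
    · have hrest : ∀ x ∈ u, ∀ y ∈ t, x ≤ y := fun x hx y hy => h x (by simp [hx]) y hy
      rw [List.cons_append,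
        show PySem.List.insertBy (fun a b : Int => decide (a < b)) v (a :: (u ++ t))
            = a :: PySem.List.insertBy (fun a b : Int => decide (a < b)) v (u ++ t) from by
          simp [PySem.List.insertBy, hva]]
      rw [List.length_cons, List.drop_succ_cons]
      exact ih hrest

-- One step of B on the three largest values of a sorted list s tracks inserting v into s.
theorem altStep_sorted (s : List Int) (hs : s.Pairwise (· ≤ ·)) (v : Int) :
    altStep (s.drop (s.length - 3)) v
      = (PySem.List.insertBy (fun a b : Int => decide (a < b)) v s).drop
          ((PySem.List.insertBy (fun a b : Int => decide (a < b)) v s).length - 3) := by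
  rw [show altStep = fun t v => (if (insertSorted t v).length > 3 then PySem.List.slice (insertSorted t v) (some 1) none else insertSorted t v) from rfl]
  simp only [insertSorted_eq_insertBy, length_insertBy_int, PySem.List.slice_from_one]
  by_cases hlen : s.length ≤ 3
  · have h0 : s.length - 3 = 0 := by omega
    rw [h0, List.drop_zero]
    by_cases h3 : s.length = 3
    · have h4 : (PySem.List.insertBy (fun a b : Int => decide (a < b)) v s).length = 4 := by
        rw [length_insertBy_int, h3]
      simp [h3, List.drop_one]
    · have : ¬ s.length + 1 > 3 := by omega
      simp [this, show s.length + 1 - 3 = 0 by omega]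
  · -- s is long: split s = take (len-3) ++ drop (len-3)
    have hsplit : s = s.take (s.length - 3) ++ s.drop (s.length - 3) := (List.take_append_drop _ s).symm
    have hle : ∀ x ∈ s.take (s.length - 3), ∀ y ∈ s.drop (s.length - 3), x ≤ y := by
      have := (List.pairwise_append.mp (hsplit ▸ hs)).2.2
      exact this
    have hlent : (s.drop (s.length - 3)).length = 3 := by
      simp [List.length_drop]; omega
    have hcond : (s.drop (s.length - 3)).length + 1 > 3 := by omega
    rw [if_pos (by omega)]
    have key := insertBy_drop (s.take (s.length - 3)) (s.drop (s.length - 3)) v hle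
    rw [← hsplit] at key
    have hL : s.length + 1 - 3 = (s.take (s.length - 3)).length + 1 := by
      simp [List.length_take]; omega
    rw [hL]
    exact key.symm

-- B's whole fold computes the last three elements of the ascending sort of vs.
theorem fold_altStep (vs : List Int) :
    vs.foldl altStep []
      = (PySem.List.sorted vs (fun x => x) false).drop
          ((PySem.List.sorted vs (fun x => x) false).length - 3) := by
  induction vs using List.reverseRecOn with
  | nil => rw [PySem.List.sorted_eq_foldl_insertBy]; simp
  | append_singleton vs v ih =>
    rw [List.foldl_append, List.foldl_cons, List.foldl_nil, ih]
    have hsortapp : PySem.List.sorted (vs ++ [v]) (fun x => x) false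
        = PySem.List.insertBy (fun a b : Int => decide (a < b)) v (PySem.List.sorted vs (fun x => x) false) := by
      rw [PySem.List.sorted_eq_foldl_insertBy, List.foldl_append, List.foldl_cons, List.foldl_nil,
        ← PySem.List.sorted_eq_foldl_insertBy]
    rw [hsortapp]
    exact altStep_sorted _ (PySem.List.sorted_pairwise vs (fun x => x)) v

-- Python's stable descending sort of plain integers is the reverse of the ascending sort.
theorem sorted_rev_eq_reverse (vs : List Int) :
    PySem.List.sorted vs (fun x => x) true = (PySem.List.sorted vs (fun x => x) false).reverse := by
  apply List.eq_of_perm_of_sorted (le := fun a b : Int => b ≤ a)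
  · exact fun a b _ _ h1 h2 => le_antisymm h2 h1
  · exact PySem.List.sorted_pairwise_rev vs (fun x => x)
  · rw [List.pairwise_reverse]
    exact PySem.List.sorted_pairwise vs (fun x => x)
  · exact ((PySem.List.sorted_perm vs (fun x => x) true).trans
      ((PySem.List.sorted_perm vs (fun x => x) false).symm)).trans
      (List.reverse_perm _).symm

theorem take_three_reverse (s : List Int) :
    s.reverse.take 3 = (s.drop (s.length - 3)).reverse := by
  apply List.reverse_injective
  rw [List.reverse_reverse, List.reverse_take]
  simp

-- ===== VERDICT (by name: the statement is the Claim_ definition above) =====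
theorem niss_score_spec : Claim_equal_niss_score := by
  intro insult_dict _
  unfold Spec_niss_score
  simp only [niss_score, niss_score_alt]
  set d := PySem.Dict.ofList insult_dict with hd
  have hvals : List.foldl (fun acc p => acc ++ [p.2]) ([] : List Int) d.items = d.values := by
    rw [PySem.List.foldl_append_singleton_eq_map]; rfl
  rw [hvals]
  set vs := d.values with hvs
  have hkeys : (d.keys = []) ↔ vs = [] := by
    simp [PySem.Dict.keys, PySem.Dict.values, hvs]
  have htop := fold_altStep vs
  set s := PySem.List.sorted vs (fun x => x) false with hsdef
  have hslen : s.length = vs.length := PySem.List.length_sorted vs (fun x => x) false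
  have htopnil : (vs.foldl altStep [] = []) ↔ vs = [] := by
    rw [htop]
    constructor
    · intro h
      have hlen0 : vs.length = 0 := by
        have := List.drop_eq_nil_iff.mp h
        omega
      exact List.length_eq_zero_iff.mp hlen0
    · intro h
      have hs0 : s = [] := by
        apply List.length_eq_zero_iff.mp
        rw [hslen, h]; rfl
      rw [hs0]; simp
  by_cases hk : d.keys = []
  · rw [if_pos hk, if_pos (htopnil.mpr (hkeys.mp hk))]
  · have hvne : ¬ vs = [] := fun h => hk (hkeys.mpr h)
    rw [if_neg hk, if_neg (fun h => hvne (htopnil.mp h))]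
    congr 1
    rw [PySem.List.foldl_add, zero_add]
    rw [show PySem.List.slice (PySem.List.sorted vs (fun x => x) true) none (some 3)
        = (PySem.List.sorted vs (fun x => x) true).take 3 by
      rw [PySem.List.slice_to _ (by norm_num)]; rfl]
    rw [sorted_rev_eq_reverse, ← hsdef, take_three_reverse, htop]
    rw [List.map_reverse, List.sum_reverse]
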